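-- pv_equiv track=rewrite | github.com/gracewang25/CS412-app-fall24 | restaurant/views.py | get_item_image
-- ===== SOURCE A (Python) =====
-- MENU_ITEMS = [
--     {'name': 'Cat-puccino', 'price': 4.50, 'image': "https://cs-people.bu.edu/grace25/cat_images/image1.png"},
--     {'name': 'Calico frappe', 'price': 5.00, 'image': "https://cs-people.bu.edu/grace25/cat_images/image2.png"},
--     {'name': 'Kit-Tea Fog', 'price': 3.50, 'image': "https://cs-people.bu.edu/grace25/cat_images/image3.png"},
--     {'name': 'Purrtado', 'price': 6.00, 'image': "https://cs-people.bu.edu/grace25/cat_images/image4.png"},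
--     {'name': 'Meowhito', 'price': 7.50, 'image': "https://cs-people.bu.edu/grace25/cat_images/image5.png"},
--     {'name': 'Tuna Sandwich', 'price': 8.00, 'image': "https://cs-people.bu.edu/grace25/cat_images/image6.png"},
--     {'name': 'Tira-meow-su', 'price': 6.50, 'image': "https://cs-people.bu.edu/grace25/cat_images/image7.png"},
-- ]
--
-- DAILY_SPECIALS = [
--     {'name': 'Biscof Cheescake', 'price': 9.00, 'image': "https://cs-people.bu.edu/grace25/cat_images/image8.png"},
--     {'name': 'Pawcake Stack', 'price': 6.50, 'image': "https://cs-people.bu.edu/grace25/cat_images/image9.png"},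
--     {'name': 'Catnip Salad', 'price': 9.00, 'image': "https://cs-people.bu.edu/grace25/cat_images/image10.png"}
-- ]
--
-- def get_item_image(item_name):
--     for item in MENU_ITEMS:
--         if item['name'] == item_name:
--             return item['image']
--     for item in DAILY_SPECIALS:
--         if item['name'] == item_name:
--             return item['image']
--     return "https://cs-people.bu.edu/grace25/cat_images/placeholder.png"
-- ===== SOURCE B (Python) =====
-- # The ten item names in display order; the image URL is computed from the
-- # item's position (menu items occupy slots 1-7, specials 8-10), so no URL
-- # table is stored at all.
-- ITEM_NAMES = [
--     'Cat-puccino', 'Calico frappe', 'Kit-Tea Fog', 'Purrtado',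
--     'Meowhito', 'Tuna Sandwich', 'Tira-meow-su',
--     'Biscof Cheescake', 'Pawcake Stack', 'Catnip Salad',
-- ]
--
-- def get_item_image(item_name):
--     try:
--         i = ITEM_NAMES.index(item_name)
--     except ValueError:
--         return "https://cs-people.bu.edu/grace25/cat_images/placeholder.png"
--     return f"https://cs-people.bu.edu/grace25/cat_images/image{i + 1}.png"
-- ===== Notes on version B (the rewrite author's own statement) =====
-- stated objective: alternative
-- what changed: Replaced A's two URL-carrying list scans by a single list of the ten names in display order plus arithmetic URL construction: the image URL is computed from the matched position (f-string with index+1), so no URL table exists at all.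
import Mathlib
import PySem

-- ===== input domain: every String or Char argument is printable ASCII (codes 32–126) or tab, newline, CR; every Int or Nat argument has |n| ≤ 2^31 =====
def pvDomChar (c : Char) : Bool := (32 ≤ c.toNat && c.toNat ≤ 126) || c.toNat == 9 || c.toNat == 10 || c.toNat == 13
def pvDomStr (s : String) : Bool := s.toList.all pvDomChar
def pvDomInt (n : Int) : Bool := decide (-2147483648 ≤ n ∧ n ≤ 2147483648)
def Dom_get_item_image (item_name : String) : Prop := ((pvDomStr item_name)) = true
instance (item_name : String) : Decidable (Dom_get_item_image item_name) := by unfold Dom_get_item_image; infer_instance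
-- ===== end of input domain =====

-- B stores only the ten item names in display order and computes the image URL arithmetically from the matched position (menu slots 1-7, specials 8-10) instead of scanning two url-carrying lists: a different, table-free algorithm of the same cost.


-- ===== PORT A =====
-- MENU_ITEMS / DAILY_SPECIALS ported as their (name, image) fields (the only ones the function reads)
def pvMenuItems : List (String × String) :=
  [("Cat-puccino", "https://cs-people.bu.edu/grace25/cat_images/image1.png"),
   ("Calico frappe", "https://cs-people.bu.edu/grace25/cat_images/image2.png"),
   ("Kit-Tea Fog", "https://cs-people.bu.edu/grace25/cat_images/image3.png"),
   ("Purrtado", "https://cs-people.bu.edu/grace25/cat_images/image4.png"),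
   ("Meowhito", "https://cs-people.bu.edu/grace25/cat_images/image5.png"),
   ("Tuna Sandwich", "https://cs-people.bu.edu/grace25/cat_images/image6.png"),
   ("Tira-meow-su", "https://cs-people.bu.edu/grace25/cat_images/image7.png")]

def pvDailySpecials : List (String × String) :=
  [("Biscof Cheescake", "https://cs-people.bu.edu/grace25/cat_images/image8.png"),
   ("Pawcake Stack", "https://cs-people.bu.edu/grace25/cat_images/image9.png"),
   ("Catnip Salad", "https://cs-people.bu.edu/grace25/cat_images/image10.png")]

-- "for item in …: if item['name'] == item_name: return item['image']" (one loop of A)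
def pvScan (item_name : String) : List (String × String) → Option String
  | [] => none
  | (n, img) :: rest => if n == item_name then some img else pvScan item_name rest

def get_item_image (item_name : String) : String :=
  match pvScan item_name pvMenuItems with
  | some img => img
  | none =>
    match pvScan item_name pvDailySpecials with
    | some img => img
    | none => "https://cs-people.bu.edu/grace25/cat_images/placeholder.png"

-- ===== PORT B =====
-- ITEM_NAMES: the ten names in display order; the URL is computed from the position
def pvItemNames : List String :=
  ["Cat-puccino", "Calico frappe", "Kit-Tea Fog", "Purrtado",
   "Meowhito", "Tuna Sandwich", "Tira-meow-su",
   "Biscof Cheescake", "Pawcake Stack", "Catnip Salad"]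

def get_item_image_alt (item_name : String) : String :=
  match PySem.List.index? pvItemNames item_name with
  | none => "https://cs-people.bu.edu/grace25/cat_images/placeholder.png"
  | some i =>
      "https://cs-people.bu.edu/grace25/cat_images/image" ++
        PySem.Int.toStr ((i : Int) + 1) ++ ".png"

-- ===== PRECONDITION & SPEC =====
def Spec_get_item_image (item_name : String) (out : String) : Prop := out = get_item_image_alt item_name
instance (item_name : String) (out : String) : Decidable (Spec_get_item_image item_name out) := by unfold Spec_get_item_image; infer_instance

-- ===== CLAIM (what is proved, stated in full; the proofs are below) =====
def Claim_equal_get_item_image : Prop := ∀ (item_name : String), Dom_get_item_image item_name → Spec_get_item_image item_name (get_item_image item_name)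

-- ===== LEMMAS AND PROOFS =====

-- ===== VERDICT (by name: the statement is the Claim_ definition above) =====
theorem get_item_image_spec : Claim_equal_get_item_image := by
  intro s _
  unfold Spec_get_item_image get_item_image get_item_image_alt pvMenuItems pvDailySpecials pvItemNames
  by_cases h1 : ("Cat-puccino" = s); · subst h1; decide
  by_cases h2 : ("Calico frappe" = s); · subst h2; decide
  by_cases h3 : ("Kit-Tea Fog" = s); · subst h3; decide
  by_cases h4 : ("Purrtado" = s); · subst h4; decide
  by_cases h5 : ("Meowhito" = s); · subst h5; decide
  by_cases h6 : ("Tuna Sandwich" = s); · subst h6; decide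
  by_cases h7 : ("Tira-meow-su" = s); · subst h7; decide
  by_cases h8 : ("Biscof Cheescake" = s); · subst h8; decide
  by_cases h9 : ("Pawcake Stack" = s); · subst h9; decide
  by_cases h10 : ("Catnip Salad" = s); · subst h10; decide
  rw [PySem.List.index?_eq_idxOf?]
  simp [pvScan, List.idxOf?, List.findIdx?, List.findIdx?.go, beq_iff_eq, h1, h2, h3, h4, h5, h6, h7, h8, h9, h10]
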